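-- pv_equiv track=rewrite | github.com/Niranjanakamaraj/Data-Structures-and-Algorithms | Dsa_in_python/Coding_Challenges/intersection.py | intersectSize
-- ===== SOURCE A (Python) =====
-- def intersectSize(a, b):
--     c=a+b
--     c.sort()
--     count=0
--     for i in range(1,len(c)):
--         if c[i]==c[i-1]:
--             count+=1
--     return count
-- ===== SOURCE B (Python) =====
-- def intersectSize(a, b):
--     c = a + b
--     return len(c) - len(set(c))
-- ===== Notes on version B (the rewrite author's own statement) =====
-- stated objective: simpler
-- what changed: Replaces sort-then-scan-adjacent-pairs with a closed form: the count of equal adjacent pairs in the sorted concatenation equals total length minus the number of distinct values, computed with one hash set.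
import Mathlib
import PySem

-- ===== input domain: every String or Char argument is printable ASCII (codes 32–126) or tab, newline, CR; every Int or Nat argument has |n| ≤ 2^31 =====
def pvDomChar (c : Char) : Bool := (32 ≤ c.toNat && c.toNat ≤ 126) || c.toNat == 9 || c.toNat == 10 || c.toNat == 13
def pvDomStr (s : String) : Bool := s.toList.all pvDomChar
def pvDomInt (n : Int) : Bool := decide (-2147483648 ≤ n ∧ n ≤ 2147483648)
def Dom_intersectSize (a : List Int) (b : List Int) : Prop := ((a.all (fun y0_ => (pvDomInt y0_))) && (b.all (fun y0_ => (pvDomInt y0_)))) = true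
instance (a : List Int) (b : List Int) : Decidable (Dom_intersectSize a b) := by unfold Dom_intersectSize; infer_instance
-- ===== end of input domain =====

-- B counts the duplicates in a+b as (total length − number of distinct values) via one hash set,
-- instead of A's sort followed by a scan counting equal adjacent pairs (objective: simpler).

-- ===== PORT A =====
def intersectSize (a : List Int) (b : List Int) : Int :=
  let c := PySem.List.sorted (a ++ b) (fun x => x) false
  (PySem.List.pyRange 1 (c.length : Int)).foldl
    (fun count i =>
      if PySem.List.pyGetD c i 0 = PySem.List.pyGetD c (i - 1) 0 then count + 1 else count) 0

-- ===== PORT B =====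
def intersectSize_alt (a : List Int) (b : List Int) : Int :=
  let c := a ++ b
  (c.length : Int) - ((PySem.Set.ofList c).length : Int)

-- ===== PRECONDITION & SPEC =====
def Spec_intersectSize (a : List Int) (b : List Int) (out : Int) : Prop := out = intersectSize_alt a b
instance (a : List Int) (b : List Int) (out : Int) : Decidable (Spec_intersectSize a b out) := by unfold Spec_intersectSize; infer_instance

-- ===== CLAIM (what is proved, stated in full; the proofs are below) =====
def Claim_equal_intersectSize : Prop := ∀ (a : List Int) (b : List Int), Dom_intersectSize a b → Spec_intersectSize a b (intersectSize a b)

-- ===== LEMMAS AND PROOFS =====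

-- number of equal adjacent pairs in a list (the quantity A's scan computes on the sorted list)
def adjCount : List Int → Nat
  | [] => 0
  | [_] => 0
  | x :: y :: t => (if x = y then 1 else 0) + adjCount (y :: t)

theorem adjCount_append_singleton (l : List Int) (y : Int) :
    adjCount (l ++ [y]) = adjCount l + (if l.getLast? = some y then 1 else 0) := by
  induction l with
  | nil => simp [adjCount]
  | cons x t ih =>
    cases t with
    | nil => simp [adjCount]
    | cons z t' =>
      simp only [List.cons_append, adjCount] at *
      rw [ih]
      simp [List.getLast?_cons_cons]
      omega

theorem countP_pyRange_eq_adjCount (c : List Int) :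
    (PySem.List.pyRange 1 (c.length : Int)).countP
      (fun i => decide (PySem.List.pyGetD c i 0 = PySem.List.pyGetD c (i - 1) 0)) = adjCount c := by
  induction c using List.reverseRecOn with
  | nil => rfl
  | append_singleton l y ih =>
    rcases l with _ | ⟨x, t⟩
    · rfl
    · set l := x :: t with hl
      have hlen : 1 ≤ (l.length : Int) := by simp [hl]
      have hcast : (((l ++ [y]).length : Nat) : Int) = (l.length : Int) + 1 := by
        simp
      rw [hcast, PySem.List.pyRange_one_succ_right hlen, List.countP_append]
      have hmem : ∀ i ∈ PySem.List.pyRange 1 (l.length : Int),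
          ((decide (PySem.List.pyGetD (l ++ [y]) i 0 = PySem.List.pyGetD (l ++ [y]) (i - 1) 0)) = true
            ↔ (decide (PySem.List.pyGetD l i 0 = PySem.List.pyGetD l (i - 1) 0)) = true) := by
        intro i hi
        have hb := (PySem.List.mem_pyRange_one).1 hi
        have h1 : PySem.List.pyGetD (l ++ [y]) i 0 = PySem.List.pyGetD l i 0 := by
          rw [PySem.List.pyGetD_eq_getElem _ _ (by omega) (by simp; omega),
              PySem.List.pyGetD_eq_getElem _ _ (by omega) (by exact_mod_cast hb.2)]
          exact List.getElem_append_left (by omega)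
        have h2 : PySem.List.pyGetD (l ++ [y]) (i - 1) 0 = PySem.List.pyGetD l (i - 1) 0 := by
          rw [PySem.List.pyGetD_eq_getElem _ _ (by omega) (by simp; omega),
              PySem.List.pyGetD_eq_getElem _ _ (by omega) (by
                have : (i - 1).toNat < i.toNat := by omega
                have hi2 : i.toNat ≤ l.length := by omega
                omega)]
          exact List.getElem_append_left (by omega)
        rw [h1, h2]
        -- same proposition on both sides
      rw [List.countP_congr hmem, ih, adjCount_append_singleton]
      have hne : l ≠ [] := by simp [hl]
      have hlast : PySem.List.pyGetD (l ++ [y]) ((l.length : Int)) 0 = y := by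
        rw [PySem.List.pyGetD_eq_getElem _ _ (by omega) (by simp)]
        simp
      have hprev : PySem.List.pyGetD (l ++ [y]) ((l.length : Int) - 1) 0 = l.getLast hne := by
        rw [PySem.List.pyGetD_eq_getElem _ _ (by omega) (by simp)]
        rw [List.getElem_append_left (by omega)]
        rw [List.getLast_eq_getElem]
        congr 1
        omega
      have hsome : l.getLast? = some (l.getLast hne) := List.getLast?_eq_some_getLast hne
      simp only [List.countP_cons, List.countP_nil, hlast, hprev, hsome]
      rcases eq_or_ne y (l.getLast hne) with hcase | hcase
      · simp [hcase]
      · simp [hcase, Ne.symm hcase]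

theorem adjCount_add_card (l : List Int) (h : l.Pairwise (· ≤ ·)) :
    adjCount l + l.toFinset.card = l.length := by
  induction l with
  | nil => rfl
  | cons x t ih =>
    cases t with
    | nil => simp [adjCount]
    | cons y t' =>
      have hxy : x ≤ y := (List.pairwise_cons.1 h).1 y (by simp)
      have htail := (List.pairwise_cons.1 h).2
      have ih' := ih htail
      by_cases hxy' : x = y
      · have hmem : x ∈ (y :: t').toFinset := List.mem_toFinset.2 (List.mem_cons.2 (Or.inl hxy'))
        have : (x :: y :: t').toFinset = (y :: t').toFinset := by
          rw [List.toFinset_cons (a := x), Finset.insert_eq_self.2 hmem]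
        simp only [adjCount, this, if_pos hxy', List.length_cons] at *
        omega
      · have hnot : x ∉ (y :: t').toFinset := by
          simp only [List.toFinset_cons, List.mem_toFinset, Finset.mem_insert]
          rintro (rfl | hx)
          · exact hxy' rfl
          · have hyz : y ≤ x := (List.pairwise_cons.1 htail).1 x hx
            exact hxy' (le_antisymm hxy hyz)
        have : (x :: y :: t').toFinset.card = (y :: t').toFinset.card + 1 := by
          rw [List.toFinset_cons, Finset.card_insert_of_notMem hnot]
        simp only [adjCount, this, if_neg hxy', List.length_cons] at *
        omega

theorem length_ofList_eq_card (xs : List Int) :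
    (PySem.Set.ofList xs).length = xs.toFinset.card := by
  have hnd := PySem.Set.nodup_ofList xs
  have hfs : (PySem.Set.ofList xs).toFinset = xs.toFinset := by
    ext z
    simp [PySem.Set.mem_ofList]
  rw [← hfs, List.toFinset_card_of_nodup hnd]

-- ===== VERDICT (by name: the statement is the Claim_ definition above) =====
theorem intersectSize_spec : Claim_equal_intersectSize := by
  intro a b _
  unfold Spec_intersectSize intersectSize
  have halt : intersectSize_alt a b
      = ((a ++ b).length : Int) - ((PySem.Set.ofList (a ++ b)).length : Int) := rfl
  rw [halt]
  set c := PySem.List.sorted (a ++ b) (fun x => x) false with hc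
  have hperm : c.Perm (a ++ b) := PySem.List.sorted_perm (a ++ b) (fun x => x) false
  rw [PySem.List.foldl_ite_add_one
        (fun i => PySem.List.pyGetD c i 0 = PySem.List.pyGetD c (i - 1) 0)]
  rw [countP_pyRange_eq_adjCount]
  have hsorted : c.Pairwise (· ≤ ·) := by
    have := PySem.List.sorted_pairwise (a ++ b) (fun x => x)
    simpa [hc] using this
  have h1 := adjCount_add_card c hsorted
  have h2 : (PySem.Set.ofList (a ++ b)).length = c.toFinset.card := by
    rw [length_ofList_eq_card, List.toFinset_eq_of_perm _ _ hperm]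
  have h3 : c.length = (a ++ b).length := hperm.length_eq
  omega
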